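-- pv_equiv track=rewrite | github.com/samieze/INEv | Reproducibility_Submission/reproducibility/local_experiments/REPRO_muse_INev/aMuSE/helper.py | add_numbering
-- ===== SOURCE A (Python) =====
-- def add_numbering(projkey):
--     """ take care of query projections: input string "AAB" -> "A1A2B" """
--     types = list(set(projkey))
--     projkey = list(projkey)
--     for i in types:
--         mycount = projkey.count(i)
--         if mycount > 1:
--            c = 0
--            for k in projkey:
--                if k == i:
--                    m = i + str(c + 1)
--                    projkey[projkey.index(k)] = m
--                    c += 1
--
--     return ''.join(projkey)
-- ===== SOURCE B (Python) =====
-- def add_numbering(projkey):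
--     """ take care of query projections: input string "AAB" -> "A1A2B" """
--     total = {}
--     for ch in projkey:
--         total[ch] = total.get(ch, 0) + 1
--     seen = {}
--     out = []
--     for ch in projkey:
--         if total[ch] > 1:
--             n = seen.get(ch, 0) + 1
--             seen[ch] = n
--             out.append(ch + str(n))
--         else:
--             out.append(ch)
--     return ''.join(out)
-- ===== Notes on version B (the rewrite author's own statement) =====
-- stated objective: faster
-- what changed: Replaces the per-distinct-char rescan with in-place mutation and repeated list.index calls (quadratic) by one counting pass plus one emitting pass with a running per-char counter (linear).
import Mathlib
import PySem

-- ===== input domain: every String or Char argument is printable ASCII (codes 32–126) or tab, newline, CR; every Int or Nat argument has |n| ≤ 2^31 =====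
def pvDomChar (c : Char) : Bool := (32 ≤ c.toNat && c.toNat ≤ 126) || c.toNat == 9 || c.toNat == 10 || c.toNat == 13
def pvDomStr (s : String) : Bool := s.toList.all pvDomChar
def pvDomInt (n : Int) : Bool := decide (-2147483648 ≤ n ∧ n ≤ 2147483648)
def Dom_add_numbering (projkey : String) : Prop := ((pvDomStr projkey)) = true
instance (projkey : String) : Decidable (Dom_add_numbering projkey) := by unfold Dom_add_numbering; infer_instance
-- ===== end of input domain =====

-- B replaces A's per-distinct-char rescan-and-mutate loops by one counting pass plus one
-- emitting pass with a running per-char counter (objective: faster).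

-- ===== PORT A =====
-- the inner 'for k in projkey' loop body (iteration over the mutating list = index loop over its fixed length)
def pvInnerStep (i : Char) (st : List (List Char) × Int) (idx : Nat) : List (List Char) × Int :=
  let k := st.1.getD idx []
  if k = [i] then
    let m := [i] ++ PySem.Int.toChars (st.2 + 1)
    match PySem.List.index? st.1 k with
    | some j => (st.1.set j m, st.2 + 1)
    | none => (st.1, st.2)  -- unreachable: k is an element of st.1
  else st

-- the body of 'for i in types'
def pvOuterStep (l : List (List Char)) (i : Char) : List (List Char) :=
  let mycount := PySem.List.count l [i]
  if mycount > 1 then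
    ((List.range l.length).foldl (pvInnerStep i) (l, (0 : Int))).1
  else l

def add_numbering (projkey : String) : String :=
  let types : PySem.Set Char := PySem.Set.ofList projkey.toList
  let l : List (List Char) := projkey.toList.map (fun c => [c])
  String.mk (PySem.Chars.join [] (types.foldl pvOuterStep l))

-- ===== PORT B =====
def pvBStep (total : PySem.Dict Char Int) (st : PySem.Dict Char Int × List (List Char)) (ch : Char) :
    PySem.Dict Char Int × List (List Char) :=
  if total.getD ch 0 > 1 then
    let n := st.1.getD ch 0 + 1
    (st.1.insert ch n, st.2 ++ [[ch] ++ PySem.Int.toChars n])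
  else (st.1, st.2 ++ [[ch]])

def add_numbering_alt (projkey : String) : String :=
  let cs := projkey.toList
  let total := cs.foldl (fun d ch => d.insert ch (d.getD ch 0 + 1)) PySem.Dict.empty
  String.mk (PySem.Chars.join [] (cs.foldl (pvBStep total) (PySem.Dict.empty, [])).2)

-- ===== PRECONDITION & SPEC =====
def Spec_add_numbering (projkey : String) (out : String) : Prop := out = add_numbering_alt projkey
instance (projkey : String) (out : String) : Decidable (Spec_add_numbering projkey out) := by unfold Spec_add_numbering; infer_instance

-- ===== CLAIM (what is proved, stated in full; the proofs are below) =====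
def Claim_equal_add_numbering : Prop := ∀ (projkey : String), Dom_add_numbering projkey → Spec_add_numbering projkey (add_numbering projkey)

-- ===== LEMMAS AND PROOFS =====

-- the entry produced for character ch after prefix q, once the distinct chars in S have been processed
def pvEntry (cnt : Char → Nat) (S : List Char) (q : List Char) (ch : Char) : List Char :=
  if ch ∈ S ∧ 1 < cnt ch then [ch] ++ PySem.Int.toChars ((q.count ch : Int) + 1) else [ch]

-- the whole working list after the chars in S have been processed
def pvMark (cnt : Char → Nat) (S : List Char) (pre : List Char) : List Char → List (List Char)
  | [] => []
  | ch :: t => pvEntry cnt S pre ch :: pvMark cnt S (pre ++ [ch]) t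

lemma pvToDigitsCore_len (b : Nat) : ∀ (fuel n : Nat) (ds : List Char),
    ds.length ≤ (Nat.toDigitsCore b fuel n ds).length := by
  intro fuel
  induction fuel with
  | zero => intro n ds; simp [Nat.toDigitsCore]
  | succ f ih =>
    intro n ds
    rw [Nat.toDigitsCore]
    split
    · simp
    · exact le_trans (by simp) (ih _ _)

lemma pvToChars_ne_nil (n : Int) (h : 1 ≤ n) : PySem.Int.toChars n ≠ [] := by
  intro hnil
  unfold PySem.Int.toChars at hnil
  rw [if_neg (by omega)] at hnil
  have h1 : 1 ≤ (Nat.toDigits 10 n.toNat).length := by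
    rw [Nat.toDigits, Nat.toDigitsCore]
    split
    · simp
    · exact le_trans (by simp) (pvToDigitsCore_len _ _ _ _)
  rw [hnil] at h1
  simp at h1

lemma pvEntry_eq_singleton_iff_of_notMem {cnt : Char → Nat} {S q : List Char} {ch i : Char}
    (hiS : i ∉ S) : pvEntry cnt S q ch = [i] ↔ ch = i := by
  unfold pvEntry
  split_ifs with hm
  · simp only [List.singleton_append, List.cons.injEq]
    constructor
    · rintro ⟨rfl, _⟩; exact absurd hm.1 hiS
    · rintro rfl; exact absurd hm.1 hiS
  · simp

lemma pvEntry_ne_of_ne {cnt : Char → Nat} {S q : List Char} {ch i : Char}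
    (hch : ch ≠ i) : pvEntry cnt S q ch ≠ [i] := by
  unfold pvEntry
  split_ifs <;> simp [hch]

lemma pvEntry_ne_of_mem {cnt : Char → Nat} {S q : List Char} {i : Char}
    (hi : i ∈ S) (hcnt : 1 < cnt i) : pvEntry cnt S q i ≠ [i] := by
  unfold pvEntry
  rw [if_pos ⟨hi, hcnt⟩]
  intro h
  have hq : (0 : Int) ≤ (q.count i : Int) := Int.natCast_nonneg _
  have : PySem.Int.toChars ((q.count i : Int) + 1) = [] := by
    simpa using h
  exact pvToChars_ne_nil _ (by omega) this

lemma pvMark_length {cnt : Char → Nat} {S : List Char} :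
    ∀ (rest pre : List Char), (pvMark cnt S pre rest).length = rest.length := by
  intro rest
  induction rest with
  | nil => intro pre; simp [pvMark]
  | cons ch t ih => intro pre; simp [pvMark, ih]

lemma pvMark_getElem? {cnt : Char → Nat} {S : List Char} :
    ∀ (rest pre : List Char) (p : Nat),
    (pvMark cnt S pre rest)[p]? = rest[p]?.map (fun ch => pvEntry cnt S (pre ++ rest.take p) ch) := by
  intro rest
  induction rest with
  | nil => intro pre p; simp [pvMark]
  | cons ch t ih =>
    intro pre p
    cases p with
    | zero => simp [pvMark]
    | succ p =>
      simp only [pvMark, List.getElem?_cons_succ, List.take_succ_cons, ih]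
      simp

lemma pvMark_count {cnt : Char → Nat} {S : List Char} {i : Char} (hiS : i ∉ S) :
    ∀ (rest pre : List Char), (pvMark cnt S pre rest).count [i] = rest.count i := by
  intro rest
  induction rest with
  | nil => intro pre; simp [pvMark]
  | cons ch t ih =>
    intro pre
    simp only [pvMark, List.count_cons, ih]
    congr 1
    by_cases hch : ch = i
    · subst hch
      have h1 : pvEntry cnt S pre ch = [ch] :=
        (pvEntry_eq_singleton_iff_of_notMem hiS).mpr rfl
      simp [h1]
    · have := pvEntry_ne_of_ne (cnt := cnt) (S := S) (q := pre) hch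
      simp [hch, this]

lemma pvMark_congr {cnt : Char → Nat} {S S' : List Char} :
    ∀ (rest : List Char), (∀ ch ∈ rest, ((ch ∈ S ∧ 1 < cnt ch) ↔ (ch ∈ S' ∧ 1 < cnt ch))) →
    ∀ (pre : List Char), pvMark cnt S pre rest = pvMark cnt S' pre rest := by
  intro rest
  induction rest with
  | nil => intro _ pre; simp [pvMark]
  | cons ch t ih =>
    intro h pre
    simp only [pvMark]
    have h1 : pvEntry cnt S pre ch = pvEntry cnt S' pre ch := by
      unfold pvEntry
      by_cases hm : ch ∈ S ∧ 1 < cnt ch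
      · rw [if_pos hm, if_pos ((h ch (by simp)).mp hm)]
      · rw [if_neg hm, if_neg (fun hm' => hm ((h ch (by simp)).mpr hm'))]
    rw [h1, ih (fun c hc => h c (by simp [hc])) _]

lemma pvMark_nil_left {cnt : Char → Nat} :
    ∀ (rest pre : List Char), pvMark cnt [] pre rest = rest.map (fun c => [c]) := by
  intro rest
  induction rest with
  | nil => intro pre; simp [pvMark]
  | cons ch t ih => intro pre; simp [pvMark, pvEntry, ih]

lemma pvSetAppend {α : Type} : ∀ (A : List α) (x : α) (rest : List α) (v : α),
    (A ++ x :: rest).set A.length v = A ++ v :: rest := by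
  intro A
  induction A with
  | nil => intro x rest v; simp
  | cons a A ih => intro x rest v; simp [ih]

-- the inner loop turns the list marked for S into the list marked for S ++ [i]
lemma pvInner_step (cs : List Char) (i : Char) (S : List Char) (hiS : i ∉ S)
    (hgt : 1 < cs.count i) (idx : Nat) (hidx : idx < cs.length) :
    pvInnerStep i
      ((pvMark (fun c => cs.count c) (S ++ [i]) [] cs).take idx ++
         (pvMark (fun c => cs.count c) S [] cs).drop idx,
       ((cs.take idx).count i : Int)) idx
    = ((pvMark (fun c => cs.count c) (S ++ [i]) [] cs).take (idx + 1) ++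
         (pvMark (fun c => cs.count c) S [] cs).drop (idx + 1),
       ((cs.take (idx + 1)).count i : Int)) := by
  set cnt : Char → Nat := fun c => cs.count c with hcnt
  set T := pvMark cnt (S ++ [i]) [] cs with hT
  set Src := pvMark cnt S [] cs with hSrc
  have hTlen : T.length = cs.length := pvMark_length cs []
  have hSlen : Src.length = cs.length := pvMark_length cs []
  have htakelen : (T.take idx).length = idx := by simp [hTlen]; omega
  have hidxT : idx < T.length := by omega
  have hidxS : idx < Src.length := by omega
  have hSrcIdx : Src[idx]? = some (pvEntry cnt S (cs.take idx) cs[idx]) := by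
    rw [hSrc, pvMark_getElem?]
    simp [List.getElem?_eq_getElem hidx]
  have hTIdx : T[idx]? = some (pvEntry cnt (S ++ [i]) (cs.take idx) cs[idx]) := by
    rw [hT, pvMark_getElem?]
    simp [List.getElem?_eq_getElem hidx]
  have hSrcIdx' : Src[idx]'hidxS = pvEntry cnt S (cs.take idx) cs[idx] := by
    have := List.getElem?_eq_getElem hidxS
    rw [hSrcIdx] at this
    exact (Option.some.injEq _ _ ▸ this.symm)
  have hTIdx' : T[idx]'hidxT = pvEntry cnt (S ++ [i]) (cs.take idx) cs[idx] := by
    have := List.getElem?_eq_getElem hidxT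
    rw [hTIdx] at this
    exact (Option.some.injEq _ _ ▸ this.symm)
  have hdrop : Src.drop idx = Src[idx]'hidxS :: Src.drop (idx + 1) :=
    List.drop_eq_getElem_cons hidxS
  have hTtake : T.take (idx + 1) = T.take idx ++ [T[idx]'hidxT] := by
    rw [List.take_add_one, List.getElem?_eq_getElem hidxT]
    rfl
  have hk : (T.take idx ++ Src.drop idx).getD idx [] = pvEntry cnt S (cs.take idx) cs[idx] := by
    rw [List.getD_eq_getElem?_getD, List.getElem?_append_right (by omega),
      htakelen, Nat.sub_self, List.getElem?_drop, Nat.add_zero, hSrcIdx]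
    rfl
  have htake1 : cs.take (idx + 1) = cs.take idx ++ [cs[idx]] := by
    rw [List.take_add_one, List.getElem?_eq_getElem hidx]
    rfl
  have hcstake : (cs.take (idx + 1)).count i
      = (cs.take idx).count i + if cs[idx] = i then 1 else 0 := by
    rw [htake1, List.count_append]
    congr 1
    by_cases h' : cs[idx] = i
    · simp [h']
    · simp [h']
  by_cases hc : cs[idx] = i
  · -- the element is i: it gets replaced
    have hE : pvEntry cnt S (cs.take idx) cs[idx] = [i] :=
      (pvEntry_eq_singleton_iff_of_notMem hiS).mpr hc
    have hnotmem : [i] ∉ T.take idx := by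
      intro hmem
      rw [List.mem_iff_getElem?] at hmem
      obtain ⟨p, hp⟩ := hmem
      have hplt : p < idx := by
        by_contra hge
        rw [List.getElem?_eq_none (by omega)] at hp
        simp at hp
      rw [List.getElem?_take_of_lt hplt, hT, pvMark_getElem?] at hp
      have hpcs : p < cs.length := by omega
      rw [List.getElem?_eq_getElem hpcs] at hp
      simp only [Option.map_some, Option.some.injEq] at hp
      by_cases hpc : cs[p] = i
      · rw [hpc] at hp
        exact pvEntry_ne_of_mem (by simp) hgt hp
      · exact pvEntry_ne_of_ne hpc hp
    have hidxeq : PySem.List.index? (T.take idx ++ Src.drop idx) [i] = some idx := by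
      apply (PySem.List.index?_eq_some_iff _ _ _).mpr
      refine ⟨T.take idx, Src.drop (idx + 1), ?_, htakelen, hnotmem⟩
      rw [hdrop, hSrcIdx', hE]
    unfold pvInnerStep
    simp only [hk, hE, hidxeq]
    have hm : [i] ++ PySem.Int.toChars (((cs.take idx).count i : Int) + 1)
        = T[idx]'hidxT := by
      rw [hTIdx', hc]
      unfold pvEntry
      rw [if_pos ⟨by simp, hgt⟩]
    have hset : (T.take idx ++ Src.drop idx).set idx (T[idx]'hidxT)
        = T.take (idx + 1) ++ Src.drop (idx + 1) := by
      rw [hdrop, hSrcIdx', hE]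
      have := pvSetAppend (T.take idx) ([i]) (Src.drop (idx + 1)) (T[idx]'hidxT)
      rw [htakelen] at this
      rw [this, hTtake, List.append_assoc]
      rfl
    rw [hm, hset, if_pos trivial]
    refine Prod.ext rfl ?_
    rw [hcstake, if_pos hc]
    push_cast
    ring
  · -- the element is not i: no-op, and the two marked lists agree at idx
    have hkne : pvEntry cnt S (cs.take idx) cs[idx] ≠ [i] := pvEntry_ne_of_ne hc
    have hagree : T[idx]'hidxT = Src[idx]'hidxS := by
      rw [hTIdx', hSrcIdx']
      unfold pvEntry
      have : (cs[idx] ∈ S ++ [i] ∧ 1 < cnt cs[idx]) ↔ (cs[idx] ∈ S ∧ 1 < cnt cs[idx]) := by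
        simp [List.mem_append, hc]
      by_cases hm : cs[idx] ∈ S ∧ 1 < cnt cs[idx]
      · rw [if_pos (this.mpr hm), if_pos hm]
      · rw [if_neg (fun h => hm (this.mp h)), if_neg hm]
    unfold pvInnerStep
    simp only [hk, if_neg hkne]
    have hlist : T.take (idx + 1) ++ Src.drop (idx + 1) = T.take idx ++ Src.drop idx := by
      rw [hTtake, hdrop, hagree, List.append_assoc]
      rfl
    rw [hlist, hcstake, if_neg hc]
    norm_num

lemma pvInner_go (cs : List Char) (i : Char) (S : List Char) (hiS : i ∉ S)
    (hgt : 1 < cs.count i) :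
    ∀ (k idx : Nat), idx + k = cs.length →
    (List.range' idx k).foldl (pvInnerStep i)
      ((pvMark (fun c => cs.count c) (S ++ [i]) [] cs).take idx ++
         (pvMark (fun c => cs.count c) S [] cs).drop idx,
       ((cs.take idx).count i : Int))
    = (pvMark (fun c => cs.count c) (S ++ [i]) [] cs, (cs.count i : Int)) := by
  intro k
  induction k with
  | zero =>
    intro idx h
    have hidx : idx = cs.length := by omega
    have hT : (pvMark (fun c => cs.count c) (S ++ [i]) [] cs).length = cs.length :=
      pvMark_length cs []
    have hS : (pvMark (fun c => cs.count c) S [] cs).length = cs.length :=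
      pvMark_length cs []
    rw [List.range'_zero]
    simp only [List.foldl_nil]
    rw [List.take_of_length_le (by omega), List.drop_eq_nil_of_le (by omega),
      List.append_nil, List.take_of_length_le (by omega)]
  | succ k ih =>
    intro idx h
    rw [List.range'_succ, List.foldl_cons,
      pvInner_step cs i S hiS hgt idx (by omega)]
    exact ih (idx + 1) (by omega)

lemma pvOuter_go (cs : List Char) : ∀ (ts S : List Char), (S ++ ts).Nodup →
    ts.foldl pvOuterStep (pvMark (fun c => cs.count c) S [] cs)
      = pvMark (fun c => cs.count c) (S ++ ts) [] cs := by
  intro ts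
  induction ts with
  | nil => intro S h; simp
  | cons i ts ih =>
    intro S h
    have hiS : i ∉ S := by
      rw [List.nodup_append] at h
      intro hm
      exact h.2.2 i hm i (by simp) rfl
    have hstep : pvOuterStep (pvMark (fun c => cs.count c) S [] cs) i
        = pvMark (fun c => cs.count c) (S ++ [i]) [] cs := by
      unfold pvOuterStep
      rw [PySem.List.count_eq, pvMark_count hiS cs []]
      by_cases hgt : 1 < cs.count i
      · rw [if_pos (by omega), pvMark_length cs [], List.range_eq_range']
        have := pvInner_go cs i S hiS hgt cs.length 0 (by omega)
        simp only [List.take_zero, List.drop_zero, List.nil_append,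
          List.count_nil, Nat.cast_zero] at this
        rw [this]
      · rw [if_neg (by omega)]
        apply pvMark_congr
        intro ch hch
        by_cases hchi : ch = i
        · subst hchi
          constructor
          · rintro ⟨_, h2⟩; exact absurd h2 hgt
          · rintro ⟨_, h2⟩; exact absurd h2 hgt
        · simp [List.mem_append, hchi]
    rw [List.foldl_cons, hstep]
    have hnd : ((S ++ [i]) ++ ts).Nodup := by
      rw [List.append_assoc]
      simpa using h
    have := ih (S ++ [i]) hnd
    rw [this, List.append_assoc]
    rfl

lemma pvB_go (cs : List Char) (total : PySem.Dict Char Int)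
    (htot : ∀ ch, total.getD ch 0 = (cs.count ch : Int)) :
    ∀ (rest pre : List Char) (d : PySem.Dict Char Int) (out : List (List Char)),
    (∀ ch ∈ rest, ch ∈ cs) →
    (∀ ch, 1 < cs.count ch → d.getD ch 0 = (pre.count ch : Int)) →
    (rest.foldl (pvBStep total) (d, out)).2
      = out ++ pvMark (fun c => cs.count c) cs pre rest := by
  intro rest
  induction rest with
  | nil => intro pre d out _ _; simp [pvMark]
  | cons ch t ih =>
    intro pre d out hsub hd
    rw [List.foldl_cons]
    by_cases hgt : 1 < cs.count ch
    · have hg : total.getD ch 0 > 1 := by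
        rw [htot ch]; exact_mod_cast hgt
      have hstep : pvBStep total (d, out) ch
          = (d.insert ch (d.getD ch 0 + 1),
             out ++ [[ch] ++ PySem.Int.toChars (d.getD ch 0 + 1)]) := by
        unfold pvBStep
        rw [if_pos hg]
      rw [hstep, ih (pre ++ [ch]) _ _ (fun c hc => hsub c (by simp [hc]))
        (fun c hc => by
          by_cases hcch : c = ch
          · subst hcch
            rw [PySem.Dict.getD_insert_self, hd c hc]
            have h2 : List.count c (pre ++ [c]) = List.count c pre + 1 := by simp
            rw [h2]
            push_cast; ring
          · rw [PySem.Dict.getD_insert_of_ne _ _ _ hcch, hd c hc]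
            simp [List.count_append, Ne.symm hcch])]
      simp only [pvMark]
      rw [hd ch hgt]
      unfold pvEntry
      rw [if_pos ⟨hsub ch (by simp), hgt⟩]
      simp [List.append_assoc]
    · have hg : ¬ total.getD ch 0 > 1 := by
        rw [htot ch]
        intro h
        exact hgt (by exact_mod_cast h)
      have hstep : pvBStep total (d, out) ch = (d, out ++ [[ch]]) := by
        unfold pvBStep
        rw [if_neg hg]
      rw [hstep, ih (pre ++ [ch]) _ _ (fun c hc => hsub c (by simp [hc]))
        (fun c hc => by
          have hcch : c ≠ ch := fun h => hgt (h ▸ hc)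
          rw [hd c hc]
          simp [List.count_append, Ne.symm hcch])]
      simp only [pvMark]
      unfold pvEntry
      rw [if_neg (fun h => hgt h.2)]
      simp [List.append_assoc]

-- ===== VERDICT (by name: the statement is the Claim_ definition above) =====
theorem add_numbering_spec : Claim_equal_add_numbering := by
  unfold Claim_equal_add_numbering Spec_add_numbering
  intro projkey _
  show String.mk (PySem.Chars.join []
      ((PySem.Set.ofList projkey.toList).foldl pvOuterStep
        (projkey.toList.map (fun c => [c]))))
    = String.mk (PySem.Chars.join []
      (projkey.toList.foldl
        (pvBStep (projkey.toList.foldl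
          (fun d ch => d.insert ch (d.getD ch 0 + 1)) PySem.Dict.empty))
        (PySem.Dict.empty, [])).2)
  set cs := projkey.toList with hcs
  congr 2
  -- A's final list
  have hA : (PySem.Set.ofList cs).foldl pvOuterStep (cs.map (fun c => [c]))
      = pvMark (fun c => cs.count c) (PySem.Set.ofList cs) [] cs := by
    rw [← pvMark_nil_left (cnt := fun c => cs.count c) cs []]
    have := pvOuter_go cs (PySem.Set.ofList cs) [] (by
      simpa using PySem.Set.nodup_ofList (l := cs))
    simpa using this
  -- B's total dict counts
  have htot : ∀ ch, (cs.foldl (fun d ch => d.insert ch (d.getD ch 0 + 1))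
      PySem.Dict.empty).getD ch 0 = (cs.count ch : Int) := by
    intro ch
    rw [PySem.Dict.getD_foldl_insert_add_one]
    simp
  have hB : (cs.foldl (pvBStep (cs.foldl (fun d ch => d.insert ch (d.getD ch 0 + 1))
      PySem.Dict.empty)) (PySem.Dict.empty, [])).2
      = pvMark (fun c => cs.count c) cs [] cs := by
    have := pvB_go cs _ htot cs [] PySem.Dict.empty [] (fun c hc => hc)
      (fun c _ => by simp)
    simpa using this
  rw [hA, hB]
  apply pvMark_congr
  intro ch hch
  simp [PySem.Set.mem_ofList, hch]
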